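-- pv_equiv track=rewrite | github.com/SebastianCespedes12/Reto1_POO | Punto5.py | mismos_caracteres
-- ===== SOURCE A (Python) =====
-- def mismos_caracteres(lista:list):
--     todas_palabras = {}
--     lista_final = []
--     for i in lista:
--         todas_palabras[f"{i}"] = [] # Inicializa la lista para cada palabra
--         for j in range(97,123): # Itera sobre los caracteres de 'a' a 'z'
--             if i.count(chr(j)) > 0: # Cuenta cuántas veces aparece el carácter en la palabra
--                 todas_palabras[f"{i}"].append(f"{i.count(chr(j))} , {chr(j)}") # Agrega el carácter y su conteo a la lista de la palabra
--     for i in  todas_palabras.items():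
--         for j in todas_palabras.items():
--             if i[0] != j[0] and i[1] == j[1] and i[0] not in lista_final: # Compara las listas de caracteres de diferentes palabras
--                 lista_final.extend([i[0]]) # Agrega la palabra a la lista final si tiene los mismos caracteres que otra
--     return lista_final
-- ===== SOURCE B (Python) =====
-- def mismos_caracteres(lista: list):
--     # One pass: hash each distinct word's letter-count signature; a word belongs
--     # to the answer iff at least two distinct words share its signature.
--     firma = {}   # word -> its signature
--     veces = {}   # signature -> number of distinct words carrying it
--     orden = []   # distinct words in first-occurrence order
--     for palabra in lista:
--         if palabra not in firma:
--             sig = tuple(f"{palabra.count(chr(j))} , {chr(j)}"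
--                         for j in range(97, 123) if palabra.count(chr(j)) > 0)
--             firma[palabra] = sig
--             orden.append(palabra)
--             veces[sig] = veces.get(sig, 0) + 1
--     return [palabra for palabra in orden if veces[firma[palabra]] > 1]
-- ===== Notes on version B (the rewrite author's own statement) =====
-- stated objective: faster
-- what changed: Replaces A's quadratic all-pairs comparison of signature lists by a single pass that hashes each distinct word's letter-count signature into a dict and emits, in first-occurrence order, the words whose signature is shared by more than one distinct word.
import Mathlib
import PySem

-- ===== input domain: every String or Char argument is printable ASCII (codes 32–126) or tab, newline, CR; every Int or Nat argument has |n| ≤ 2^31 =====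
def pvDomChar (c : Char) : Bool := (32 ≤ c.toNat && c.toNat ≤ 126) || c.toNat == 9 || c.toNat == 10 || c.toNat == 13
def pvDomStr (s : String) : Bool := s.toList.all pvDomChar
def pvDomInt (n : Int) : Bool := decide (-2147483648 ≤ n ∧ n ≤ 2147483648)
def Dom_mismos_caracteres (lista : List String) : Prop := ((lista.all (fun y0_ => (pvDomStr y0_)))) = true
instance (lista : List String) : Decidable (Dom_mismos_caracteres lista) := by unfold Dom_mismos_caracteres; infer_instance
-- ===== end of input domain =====

-- B replaces A's quadratic all-pairs comparison by one pass hashing each distinct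
-- word's letter-count signature and keeping a count per signature (objective: faster).

-- shared formatting helpers (chr(j), i.count(chr(j)), the f"{count} , {chr(j)}" entry)
def pvLetra (j : Int) : String := String.singleton (Char.ofNat j.toNat)
def pvCuenta (w : String) (j : Int) : Nat := PySem.Str.count w (pvLetra j)
def pvEntry (w : String) (j : Int) : String :=
  PySem.Int.toStr (pvCuenta w j) ++ " , " ++ pvLetra j

-- ===== PORT A =====
def mismos_caracteres (lista : List String) : List String :=
  let todas : PySem.Dict String (List String) :=
    lista.foldl (fun d i =>
      (PySem.List.pyRange 97 123 1).foldl (fun d j =>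
        if 0 < pvCuenta i j then d.modify i [] (fun l => l ++ [pvEntry i j]) else d)
        (d.insert i []))
      PySem.Dict.empty
  todas.items.foldl (fun acc i =>
    todas.items.foldl (fun acc j =>
      if i.1 ≠ j.1 ∧ i.2 = j.2 ∧ i.1 ∉ acc then acc ++ [i.1] else acc) acc) []

-- ===== PORT B =====
-- the tuple-of-entries signature of one word (Python tuple of variable length → List String)
def pvSig (w : String) : List String :=
  ((PySem.List.pyRange 97 123 1).filter (fun j => decide (0 < pvCuenta w j))).map (pvEntry w)

def mismos_caracteres_alt (lista : List String) : List String :=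
  let st := lista.foldl
    (fun (st : PySem.Dict String (List String) × PySem.Dict (List String) Int × List String) palabra =>
      if st.1.contains palabra then st
      else
        (st.1.insert palabra (pvSig palabra),
         st.2.1.insert (pvSig palabra) (st.2.1.getD (pvSig palabra) 0 + 1),
         st.2.2 ++ [palabra]))
    (PySem.Dict.empty, PySem.Dict.empty, [])
  st.2.2.filter (fun palabra => decide (1 < st.2.1.getD (st.1.getD palabra []) 0))

-- ===== PRECONDITION & SPEC =====
def Spec_mismos_caracteres (lista : List String) (out : List String) : Prop := out = mismos_caracteres_alt lista
instance (lista : List String) (out : List String) : Decidable (Spec_mismos_caracteres lista out) := by unfold Spec_mismos_caracteres; infer_instance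

-- ===== CLAIM (what is proved, stated in full; the proofs are below) =====
def Claim_equal_mismos_caracteres : Prop := ∀ (lista : List String), Dom_mismos_caracteres lista → Spec_mismos_caracteres lista (mismos_caracteres lista)

-- ===== LEMMAS AND PROOFS =====

def pvFmt (w : String) : String × List String := (w, pvSig w)

theorem pv_fst_comp : ((fun x : String × List String => x.1) ∘ pvFmt) = id := rfl

theorem pv_keys_mk (ws : List String) :
    (PySem.Dict.mk (ws.map pvFmt)).keys = ws := by
  rw [PySem.Dict.keys_mk, List.map_map, pv_fst_comp, List.map_id]

theorem pv_contains_mk (ws : List String) (i : String) :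
    (PySem.Dict.mk (ws.map pvFmt)).contains i = true ↔ i ∈ ws := by
  rw [PySem.Dict.contains_iff_mem_keys, pv_keys_mk]

theorem pv_insert_old (ws : List String) (i : String) (h : i ∈ ws) :
    (PySem.Dict.mk (ws.map pvFmt)).insert i (pvSig i) = PySem.Dict.mk (ws.map pvFmt) := by
  apply PySem.Dict.ext
  rw [PySem.Dict.items_insert_of_contains _ _ ((pv_contains_mk ws i).mpr h)]
  show (ws.map pvFmt).map _ = ws.map pvFmt
  rw [List.map_map]
  apply List.map_congr_left
  intro w _
  by_cases hw : w = i
  · simp [pvFmt, hw]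
  · simp [pvFmt, hw]

theorem pv_insert_new (ws : List String) (i : String) (h : i ∉ ws) :
    (PySem.Dict.mk (ws.map pvFmt)).insert i (pvSig i) = PySem.Dict.mk ((ws ++ [i]).map pvFmt) := by
  apply PySem.Dict.ext
  have hc : (PySem.Dict.mk (ws.map pvFmt)).contains i = false := by
    rw [Bool.eq_false_iff]; intro hh; exact h ((pv_contains_mk ws i).mp hh)
  rw [PySem.Dict.items_insert_of_not_contains _ _ hc]
  simp [pvFmt]

theorem pv_add_old (ws : List String) (i : String) (h : i ∈ ws) :
    PySem.Set.add ws i = ws := by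
  unfold PySem.Set.add
  simp [PySem.Set.contains, h]

theorem pv_add_new (ws : List String) (i : String) (h : i ∉ ws) :
    PySem.Set.add ws i = ws ++ [i] := by
  unfold PySem.Set.add
  simp [PySem.Set.contains, h]

theorem pv_update_cons (s : List String) (x : String) (xs : List String) :
    PySem.Set.update s (x :: xs) = PySem.Set.update (PySem.Set.add s x) xs := rfl

-- A's inner character loop, started right after `todas[i] = []`, just rebuilds the signature of i
theorem pv_inner_loop (L : List Int) (d : PySem.Dict String (List String)) (i : String)
    (v : List String) :
    L.foldl (fun d j =>
        if 0 < pvCuenta i j then d.modify i [] (fun l => l ++ [pvEntry i j]) else d)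
      (d.insert i v)
    = d.insert i (v ++ (L.filter (fun j => decide (0 < pvCuenta i j))).map (pvEntry i)) := by
  induction L generalizing v with
  | nil => simp
  | cons j L ih =>
    by_cases h : 0 < pvCuenta i j
    · have hstep : ((d.insert i v).modify i [] (fun l => l ++ [pvEntry i j]))
          = d.insert i (v ++ [pvEntry i j]) := by
        simp only [PySem.Dict.modify, PySem.Dict.getD_insert_self, PySem.Dict.insert_insert_self]
      simp only [List.foldl_cons, if_pos h, hstep, ih, List.filter_cons, decide_eq_true h]
      simp
    · simp only [List.foldl_cons, if_neg h, ih, List.filter_cons, decide_eq_false h]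
      simp

-- A's first loop builds exactly the dict mapping each distinct word to its signature
theorem pv_buildA (lista : List String) : ∀ (ws : List String),
    lista.foldl (fun d i =>
      (PySem.List.pyRange 97 123 1).foldl (fun d j =>
        if 0 < pvCuenta i j then d.modify i [] (fun l => l ++ [pvEntry i j]) else d)
        (d.insert i []))
      (PySem.Dict.mk (ws.map pvFmt))
    = PySem.Dict.mk ((PySem.Set.update ws lista).map pvFmt) := by
  induction lista with
  | nil => intro ws; rfl
  | cons i rest ih =>
    intro ws
    have hstep : (PySem.List.pyRange 97 123 1).foldl (fun d j =>
        if 0 < pvCuenta i j then d.modify i [] (fun l => l ++ [pvEntry i j]) else d)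
        ((PySem.Dict.mk (ws.map pvFmt)).insert i [])
        = (PySem.Dict.mk (ws.map pvFmt)).insert i (pvSig i) := by
      rw [pv_inner_loop]; rfl
    by_cases hmem : i ∈ ws
    · simp only [List.foldl_cons, hstep, pv_insert_old ws i hmem, pv_update_cons,
        pv_add_old ws i hmem]
      exact ih ws
    · simp only [List.foldl_cons, hstep, pv_insert_new ws i hmem, pv_update_cons,
        pv_add_new ws i hmem]
      exact ih (ws ++ [i])

-- A's inner comparison scan appends w once iff some other item matches
theorem pv_scan (itemsL : List (String × List String)) (w : String) (s : List String) :
    ∀ (acc : List String),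
    itemsL.foldl (fun acc j => if w ≠ j.1 ∧ s = j.2 ∧ w ∉ acc then acc ++ [w] else acc) acc
    = if w ∉ acc ∧ itemsL.any (fun j => decide (w ≠ j.1) && decide (s = j.2)) then acc ++ [w] else acc := by
  induction itemsL with
  | nil => intro acc; simp
  | cons j t ih =>
    intro acc
    by_cases hacc : w ∈ acc
    · have h1 : ¬ (w ≠ j.1 ∧ s = j.2 ∧ w ∉ acc) := by tauto
      simp only [List.foldl_cons, if_neg h1, ih]
      simp [hacc]
    · by_cases hm : w ≠ j.1 ∧ s = j.2
      · have h1 : (w ≠ j.1 ∧ s = j.2 ∧ w ∉ acc) := ⟨hm.1, hm.2, hacc⟩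
        simp only [List.foldl_cons, if_pos h1, ih]
        have hmem : w ∈ acc ++ [w] := by simp
        simp [hmem, hacc, List.any_cons, hm.1, hm.2]
      · have h1 : ¬ (w ≠ j.1 ∧ s = j.2 ∧ w ∉ acc) := by tauto
        have hb : (decide (w ≠ j.1) && decide (s = j.2)) = false := by
          rcases Decidable.not_and_iff_not_or_not.mp hm with h | h
          · simp [not_not.mp h]
          · simp [h]
        simp only [List.foldl_cons, if_neg h1, ih, List.any_cons, hb, Bool.false_or]

-- A's outer comparison loop is a filter over the distinct words
theorem pv_phase2 (itemsL : List (String × List String)) (ws2 : List String) :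
    ∀ (acc : List String), ws2.Nodup → (∀ v ∈ ws2, v ∉ acc) →
    (ws2.map pvFmt).foldl (fun acc i =>
      itemsL.foldl (fun acc j =>
        if i.1 ≠ j.1 ∧ i.2 = j.2 ∧ i.1 ∉ acc then acc ++ [i.1] else acc) acc) acc
    = acc ++ ws2.filter (fun w => itemsL.any (fun j => decide (w ≠ j.1) && decide (pvSig w = j.2))) := by
  induction ws2 with
  | nil => intro acc _ _; simp
  | cons w t ih =>
    intro acc hnd hdisj
    have hw : w ∉ acc := hdisj w (by simp)
    have hwt : w ∉ t := (List.nodup_cons.mp hnd).1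
    show List.foldl
        (fun acc i => List.foldl (fun acc j =>
          if i.1 ≠ j.1 ∧ i.2 = j.2 ∧ i.1 ∉ acc then acc ++ [i.1] else acc) acc itemsL)
        (List.foldl (fun acc j =>
          if w ≠ j.1 ∧ pvSig w = j.2 ∧ w ∉ acc then acc ++ [w] else acc) acc itemsL)
        (List.map pvFmt t)
      = acc ++ List.filter (fun w => itemsL.any fun j =>
          decide (w ≠ j.1) && decide (pvSig w = j.2)) (w :: t)
    rw [pv_scan itemsL w (pvSig w) acc]
    by_cases hany : itemsL.any (fun j => decide (w ≠ j.1) && decide (pvSig w = j.2)) = true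
    · rw [if_pos ⟨hw, hany⟩]
      rw [ih (acc ++ [w]) (List.nodup_cons.mp hnd).2 ?_]
      · have hf : List.filter (fun w => itemsL.any fun j =>
              decide (w ≠ j.1) && decide (pvSig w = j.2)) (w :: t)
            = w :: List.filter (fun w => itemsL.any fun j =>
              decide (w ≠ j.1) && decide (pvSig w = j.2)) t := by
          rw [List.filter_cons]
          split
          · rfl
          · next hfalse => exact absurd hany hfalse
        rw [hf]
        simp
      · intro v hv
        simp only [List.mem_append, List.mem_singleton]
        rintro (h | h)
        · exact hdisj v (by simp [hv]) h
        · exact hwt (h ▸ hv)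
    · have hcond : ¬ (w ∉ acc ∧ itemsL.any (fun j => decide (w ≠ j.1) && decide (pvSig w = j.2)) = true) := by
        tauto
      rw [if_neg hcond]
      rw [ih acc (List.nodup_cons.mp hnd).2 (fun v hv => hdisj v (by simp [hv]))]
      have hf : List.filter (fun w => itemsL.any fun j =>
            decide (w ≠ j.1) && decide (pvSig w = j.2)) (w :: t)
          = List.filter (fun w => itemsL.any fun j =>
            decide (w ≠ j.1) && decide (pvSig w = j.2)) t := by
        rw [List.filter_cons]
        split
        · next htrue => exact absurd htrue hany
        · rfl
      rw [hf]

-- characterization of A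
theorem pv_A_eq (lista : List String) :
    mismos_caracteres lista
    = (PySem.List.dedup lista).filter (fun w =>
        (PySem.List.dedup lista).any (fun v => decide (w ≠ v) && decide (pvSig w = pvSig v))) := by
  have h1 : lista.foldl (fun d i =>
      (PySem.List.pyRange 97 123 1).foldl (fun d j =>
        if 0 < pvCuenta i j then d.modify i [] (fun l => l ++ [pvEntry i j]) else d)
        (d.insert i []))
      PySem.Dict.empty
      = PySem.Dict.mk ((PySem.List.dedup lista).map pvFmt) := pv_buildA lista []
  simp only [mismos_caracteres]
  rw [h1]
  show ((PySem.List.dedup lista).map pvFmt).foldl _ [] = _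
  rw [pv_phase2 ((PySem.List.dedup lista).map pvFmt) (PySem.List.dedup lista) []
    (PySem.List.nodup_dedup lista) (by intro v _ h; exact (List.not_mem_nil h))]
  simp only [List.nil_append]
  apply List.filter_congr
  intro w _
  rw [List.any_map]
  rfl

-- B's loop step as a named function (definitionally the lambda in mismos_caracteres_alt)
def pvStepB (st : PySem.Dict String (List String) × PySem.Dict (List String) Int × List String)
    (palabra : String) :
    PySem.Dict String (List String) × PySem.Dict (List String) Int × List String :=
  if st.1.contains palabra then st
  else
    (st.1.insert palabra (pvSig palabra),
     st.2.1.insert (pvSig palabra) (st.2.1.getD (pvSig palabra) 0 + 1),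
     st.2.2 ++ [palabra])

theorem pvStepB_mem (d : PySem.Dict String (List String)) (vc : PySem.Dict (List String) Int)
    (ws : List String) (p : String) (h : d.contains p = true) :
    pvStepB (d, vc, ws) p = (d, vc, ws) := by
  simp [pvStepB, h]

theorem pvStepB_new (d : PySem.Dict String (List String)) (vc : PySem.Dict (List String) Int)
    (ws : List String) (p : String) (h : d.contains p = false) :
    pvStepB (d, vc, ws) p
      = (d.insert p (pvSig p), vc.insert (pvSig p) (vc.getD (pvSig p) 0 + 1), ws ++ [p]) := by
  simp [pvStepB, h]

-- B builds the same distinct-word list, the signature map and the signature counts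
theorem pv_buildB (lista : List String) : ∀ (ws : List String) (veces : PySem.Dict (List String) Int),
    ws.Nodup → (∀ s, veces.getD s 0 = ((ws.map pvSig).count s : Int)) →
    (lista.foldl pvStepB (PySem.Dict.mk (ws.map pvFmt), veces, ws)).1
        = PySem.Dict.mk ((PySem.Set.update ws lista).map pvFmt)
    ∧ (lista.foldl pvStepB (PySem.Dict.mk (ws.map pvFmt), veces, ws)).2.2 = PySem.Set.update ws lista
    ∧ ∀ s, (lista.foldl pvStepB (PySem.Dict.mk (ws.map pvFmt), veces, ws)).2.1.getD s 0
        = (((PySem.Set.update ws lista).map pvSig).count s : Int) := by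
  induction lista with
  | nil => intro ws veces hnd hv; exact ⟨rfl, rfl, hv⟩
  | cons palabra rest ih =>
    intro ws veces hnd hv
    by_cases hmem : palabra ∈ ws
    · have hc : (PySem.Dict.mk (ws.map pvFmt)).contains palabra = true :=
        (pv_contains_mk ws palabra).mpr hmem
      simp only [List.foldl_cons,
        pvStepB_mem (PySem.Dict.mk (ws.map pvFmt)) veces ws palabra hc,
        pv_update_cons, pv_add_old ws palabra hmem]
      exact ih ws veces hnd hv
    · have hc : (PySem.Dict.mk (ws.map pvFmt)).contains palabra = false := by
        rw [Bool.eq_false_iff]; intro hh; exact hmem ((pv_contains_mk ws palabra).mp hh)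
      have hnd' : (ws ++ [palabra]).Nodup := by
        rw [List.nodup_append]
        refine ⟨hnd, List.nodup_singleton _, ?_⟩
        intro a ha b hb
        rw [List.mem_singleton] at hb
        subst hb
        intro h
        subst h
        exact hmem ha
      have hv' : ∀ s, (veces.insert (pvSig palabra) (veces.getD (pvSig palabra) 0 + 1)).getD s 0
          = (((ws ++ [palabra]).map pvSig).count s : Int) := by
        intro s
        rw [PySem.Dict.getD_insert]
        by_cases hs : s = pvSig palabra
        · rw [if_pos hs, hv, hs]
          simp [List.count_append]
        · rw [if_neg hs, hv]
          have hb : (pvSig palabra == s) = false := by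
            simp only [beq_eq_false_iff_ne, ne_eq]
            intro h; exact hs h.symm
          simp [List.count_append, List.count_singleton, hb]
      simp only [List.foldl_cons,
        pvStepB_new (PySem.Dict.mk (ws.map pvFmt)) veces ws palabra hc,
        pv_insert_new ws palabra hmem, pv_update_cons, pv_add_new ws palabra hmem]
      exact ih (ws ++ [palabra])
        (veces.insert (pvSig palabra) (veces.getD (pvSig palabra) 0 + 1)) hnd' hv'

-- characterization of B
theorem pv_B_eq (lista : List String) :
    mismos_caracteres_alt lista
    = (PySem.List.dedup lista).filter (fun w =>
        decide (1 < (((PySem.List.dedup lista).map pvSig).count (pvSig w) : Int))) := by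
  obtain ⟨h1, h2, h3⟩ := pv_buildB lista [] PySem.Dict.empty List.nodup_nil
    (by intro s; simp [PySem.Dict.getD_empty])
  have h1' : (lista.foldl pvStepB (PySem.Dict.empty, PySem.Dict.empty, ([] : List String))).1
      = PySem.Dict.mk ((PySem.List.dedup lista).map pvFmt) := h1
  have h2' : (lista.foldl pvStepB (PySem.Dict.empty, PySem.Dict.empty, ([] : List String))).2.2
      = PySem.List.dedup lista := h2
  have h3' : ∀ s, (lista.foldl pvStepB (PySem.Dict.empty, PySem.Dict.empty, ([] : List String))).2.1.getD s 0
      = (((PySem.List.dedup lista).map pvSig).count s : Int) := h3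
  show (lista.foldl pvStepB (PySem.Dict.empty, PySem.Dict.empty, ([] : List String))).2.2.filter
      (fun palabra => decide (1 <
        (lista.foldl pvStepB (PySem.Dict.empty, PySem.Dict.empty, ([] : List String))).2.1.getD
          ((lista.foldl pvStepB (PySem.Dict.empty, PySem.Dict.empty, ([] : List String))).1.getD palabra []) 0))
    = _
  rw [h2', h1']
  apply List.filter_congr
  intro w hw
  have hget : (PySem.Dict.mk ((PySem.List.dedup lista).map pvFmt)).getD w [] = pvSig w := by
    apply PySem.Dict.getD_of_mem_items
    · exact List.mem_map_of_mem hw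
    · rw [pv_keys_mk]; exact PySem.List.nodup_dedup lista
  rw [hget, h3']

-- on a duplicate-free list, "another word with my signature exists" = "my signature occurs more than once"
theorem pv_count_iff (ws : List String) (hnd : ws.Nodup) (w : String) (hw : w ∈ ws) :
    (ws.any (fun v => decide (w ≠ v) && decide (pvSig w = pvSig v)))
    = decide (1 < ((ws.map pvSig).count (pvSig w) : Int)) := by
  have hc : (ws.map pvSig).count (pvSig w) = ws.countP (fun v => pvSig v == pvSig w) := by
    simp only [List.count, List.countP_map]
    rfl
  have hlen : ws.countP (fun v => pvSig v == pvSig w)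
      = (ws.filter (fun v => pvSig v == pvSig w)).length := List.countP_eq_length_filter
  have hFnd : (ws.filter (fun v => pvSig v == pvSig w)).Nodup := hnd.filter _
  have hwF : w ∈ ws.filter (fun v => pvSig v == pvSig w) := by
    rw [List.mem_filter]; exact ⟨hw, by simp⟩
  by_cases hex : ∃ v ∈ ws, w ≠ v ∧ pvSig w = pvSig v
  · obtain ⟨v, hv, hne, hs⟩ := hex
    have hany : ws.any (fun v => decide (w ≠ v) && decide (pvSig w = pvSig v)) = true := by
      rw [List.any_eq_true]; exact ⟨v, hv, by simp [hne, hs]⟩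
    rw [hany]
    symm; rw [decide_eq_true_iff]
    have hvF : v ∈ ws.filter (fun v => pvSig v == pvSig w) := by
      rw [List.mem_filter]; exact ⟨hv, by simp [hs.symm]⟩
    have hsub : ({w, v} : Finset String) ⊆ (ws.filter (fun v => pvSig v == pvSig w)).toFinset := by
      intro x hx
      simp only [Finset.mem_insert, Finset.mem_singleton] at hx
      rcases hx with rfl | rfl
      · exact List.mem_toFinset.mpr hwF
      · exact List.mem_toFinset.mpr hvF
    have hcard := Finset.card_le_card hsub
    rw [Finset.card_pair hne, List.toFinset_card_of_nodup hFnd] at hcard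
    rw [hc, hlen]
    omega
  · have hany : ws.any (fun v => decide (w ≠ v) && decide (pvSig w = pvSig v)) = false := by
      rw [List.any_eq_false]
      intro v hv
      simp only [Bool.and_eq_true, decide_eq_true_iff, not_and]
      intro hne hs
      exact hex ⟨v, hv, hne, hs⟩
    rw [hany]
    symm; rw [decide_eq_false_iff_not]
    intro hlt
    rw [hc, hlen] at hlt
    have h2 : 2 ≤ (ws.filter (fun v => pvSig v == pvSig w)).length := by omega
    have hall : ∀ v ∈ ws.filter (fun v => pvSig v == pvSig w), v = w := by
      intro v hvF
      by_contra hne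
      obtain ⟨hvw, hps⟩ := List.mem_filter.mp hvF
      exact hex ⟨v, hvw, fun h => hne h.symm, (eq_of_beq hps).symm⟩
    have hsub : ws.filter (fun v => pvSig v == pvSig w) ⊆ [w] := by
      intro v hv; simp [hall v hv]
    have := (hFnd.subperm hsub).length_le
    simp at this
    omega

-- ===== VERDICT (by name: the statement is the Claim_ definition above) =====
theorem mismos_caracteres_spec : Claim_equal_mismos_caracteres := by
  intro lista _
  unfold Spec_mismos_caracteres
  rw [pv_A_eq, pv_B_eq]
  apply List.filter_congr
  intro w hw
  exact pv_count_iff _ (PySem.List.nodup_dedup lista) w hw
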